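-- pv_equiv track=rewrite | github.com/AllMyChanges/original.allmychanges.com | allmychanges/utils.py | get_markup_type
-- ===== SOURCE A (Python) =====
-- def get_markup_type(filename):
--     """Return markdown or rest or None"""
--     extension = filename.rsplit('.', 1)[-1].lower()
--     mapping = dict(
--         markdown={'md', 'markdown', 'mdown'},
--         rest={'rst', 'rest'},
--     )
--     for markup, possible_extensions in mapping.items():
--         if extension in possible_extensions:
--             return markup
-- ===== SOURCE B (Python) =====
-- _MAPPING = {
--     'md': 'markdown', 'markdown': 'markdown', 'mdown': 'markdown',
--     'rst': 'rest', 'rest': 'rest',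
-- }
--
--
-- def get_markup_type(filename):
--     """Return markdown or rest or None"""
--     return _MAPPING.get(filename.rsplit('.', 1)[-1].lower())
-- ===== Notes on version B (the rewrite author's own statement) =====
-- stated objective: idiomatic
-- what changed: Replaces the loop over markup groups with an inner set-membership test by a single precomputed flat extension-to-markup dict and one .get lookup with default None.
import Mathlib
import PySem

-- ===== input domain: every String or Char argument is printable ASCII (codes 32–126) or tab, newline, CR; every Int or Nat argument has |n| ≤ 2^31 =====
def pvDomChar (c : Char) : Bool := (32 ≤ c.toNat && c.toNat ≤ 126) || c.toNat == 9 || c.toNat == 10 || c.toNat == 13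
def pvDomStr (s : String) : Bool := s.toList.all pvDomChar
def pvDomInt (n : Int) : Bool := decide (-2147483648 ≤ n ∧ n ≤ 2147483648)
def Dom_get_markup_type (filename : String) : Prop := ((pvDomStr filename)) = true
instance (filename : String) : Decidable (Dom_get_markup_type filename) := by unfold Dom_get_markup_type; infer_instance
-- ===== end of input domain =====

-- B replaces A's loop over markup groups (with a set-membership test inside) by one
-- precomputed flat extension->markup dict and a single .get lookup (idiomatic).

-- shared hand port, exact: filename.rsplit('.', 1)[-1] = the characters after the
-- last '.' (the whole string when no '.' occurs)
def rsplitDot1Last (s : List Char) : List Char :=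
  (s.reverse.takeWhile (fun c => c ≠ '.')).reverse

-- ===== PORT A =====
-- the for-loop over mapping.items() with early return
def findMarkupA (ext : String) : List (String × PySem.Set String) → Option String
  | [] => none
  | (markup, possible) :: rest =>
      if PySem.Set.contains possible ext then some markup else findMarkupA ext rest

def get_markup_type (filename : String) : Option String :=
  let extension := String.ofList (PySem.Chars.lower (rsplitDot1Last filename.toList))
  let mapping : List (String × PySem.Set String) :=
    [("markdown", PySem.Set.ofList ["md", "markdown", "mdown"]),
     ("rest", PySem.Set.ofList ["rst", "rest"])]
  findMarkupA extension mapping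

-- ===== PORT B =====
def bMapping : PySem.Dict String String :=
  PySem.Dict.ofList [("md", "markdown"), ("markdown", "markdown"), ("mdown", "markdown"),
                     ("rst", "rest"), ("rest", "rest")]

def get_markup_type_alt (filename : String) : Option String :=
  PySem.Dict.get? bMapping (String.ofList (PySem.Chars.lower (rsplitDot1Last filename.toList)))

-- ===== PRECONDITION & SPEC =====
def Spec_get_markup_type (filename : String) (out : Option String) : Prop := out = get_markup_type_alt filename
instance (filename : String) (out : Option String) : Decidable (Spec_get_markup_type filename out) := by unfold Spec_get_markup_type; infer_instance

-- ===== CLAIM (what is proved, stated in full; the proofs are below) =====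
def Claim_equal_get_markup_type : Prop := ∀ (filename : String), Dom_get_markup_type filename → Spec_get_markup_type filename (get_markup_type filename)

-- ===== LEMMAS AND PROOFS =====
theorem lookup_eq (e : String) :
    findMarkupA e
      [("markdown", PySem.Set.ofList ["md", "markdown", "mdown"]),
       ("rest", PySem.Set.ofList ["rst", "rest"])] = bMapping.get? e := by
  have hb : bMapping = PySem.Dict.mk
      [("md", "markdown"), ("markdown", "markdown"), ("mdown", "markdown"),
       ("rst", "rest"), ("rest", "rest")] := by decide
  rw [hb]
  simp only [findMarkupA, PySem.Dict.get?_mk_cons,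
    PySem.Set.contains, PySem.Set.ofList, PySem.Set.empty]
  norm_num [List.contains_eq_mem, List.foldl]
  split_ifs <;> simp_all [PySem.Dict.get?, eq_comm]

-- ===== VERDICT (by name: the statement is the Claim_ definition above) =====
theorem get_markup_type_spec : Claim_equal_get_markup_type := by
  intro filename _
  unfold Spec_get_markup_type get_markup_type get_markup_type_alt
  exact lookup_eq _
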